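-- pv_equiv track=rewrite | github.com/BPRC-Bioinfo/VDJ-insights | scripts/RSS.py | seperate_pattern
-- ===== SOURCE A (Python) =====
-- def seperate_pattern(pattern):
--     """
--     Separates a regular expression pattern into individual components, preserving elements in brackets.
--
--     Args:
--         pattern (str): Regular expression pattern to separate.
--
--     Returns:
--         list: List of separated pattern components.
--     """
--     seperated = list()
--     for part in pattern.split('['):
--         if ']' in part:
--             reg, rest = part.split(']', 1)
--             seperated.append(f'[{reg}]')
--             seperated.extend(rest)
--         else:
--             seperated.extend(part)
--     return seperated
-- ===== SOURCE B (Python) =====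
-- def seperate_pattern(pattern):
--     """Single left-to-right scan with a buffer and a collecting flag,
--     replacing A's two-level split; same output for every input."""
--     result = []
--     buffer = ''
--     collecting = True
--     for ch in pattern:
--         if ch == '[':
--             result.extend(buffer)
--             buffer = ''
--             collecting = True
--         elif ch == ']' and collecting:
--             result.append(f'[{buffer}]')
--             buffer = ''
--             collecting = False
--         elif collecting:
--             buffer += ch
--         else:
--             result.append(ch)
--     if collecting:
--         result.extend(buffer)
--     return result
-- ===== Notes on version B (the rewrite author's own statement) =====
-- stated objective: alternative
-- what changed: Replaced A's two-level str.split pass (split on the opening bracket, then a maxsplit-1 split on the closing bracket inside each part) by a single left-to-right character scan maintaining a buffer and a collecting flag.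
import Mathlib
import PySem

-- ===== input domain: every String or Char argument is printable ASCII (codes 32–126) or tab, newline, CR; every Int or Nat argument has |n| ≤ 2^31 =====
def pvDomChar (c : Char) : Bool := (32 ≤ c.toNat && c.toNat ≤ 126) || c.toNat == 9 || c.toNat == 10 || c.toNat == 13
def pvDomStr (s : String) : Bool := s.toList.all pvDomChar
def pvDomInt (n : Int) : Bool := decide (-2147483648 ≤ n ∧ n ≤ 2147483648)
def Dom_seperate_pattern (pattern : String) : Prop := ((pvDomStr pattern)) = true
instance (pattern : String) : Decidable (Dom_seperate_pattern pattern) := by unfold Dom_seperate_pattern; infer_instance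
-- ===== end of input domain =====

-- B replaces A's two-level str.split pass by a single left-to-right character scan
-- with a buffer and a collecting flag (objective: alternative decomposition, same cost).

-- ===== PORT A =====
-- list.extend(str) adds the characters as one-char strings
def pvSing (c : Char) : String := String.ofList [c]

def seperate_pattern (pattern : String) : List String :=
  (PySem.Chars.splitOn pattern.toList ['[']).foldl
    (fun sep part =>
      if PySem.Chars.isIn [']'] part then
        -- reg, rest = part.split(']', 1)  — exactly two pieces since ']' ∈ part
        match PySem.Chars.splitOnMax part [']'] 1 with
        | reg :: rest :: _ => sep ++ [String.ofList ('[' :: reg ++ [']'])] ++ rest.map pvSing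
        | _ => sep
      else sep ++ part.map pvSing) []

-- ===== PORT B =====
-- one scan step: state = (result, buffer, collecting); buffer kept as List Char
def pvScanStep (st : List String × List Char × Bool) (c : Char) :
    List String × List Char × Bool :=
  match st with
  | (res, buf, collecting) =>
    if c = '[' then (res ++ buf.map pvSing, [], true)
    else if c = ']' ∧ collecting then (res ++ [String.ofList ('[' :: buf ++ [']'])], [], false)
    else if collecting then (res, buf ++ [c], collecting)
    else (res ++ [pvSing c], buf, collecting)

def seperate_pattern_alt (pattern : String) : List String :=
  match pattern.toList.foldl pvScanStep ([], [], true) with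
  | (res, buf, collecting) => if collecting then res ++ buf.map pvSing else res

-- ===== PRECONDITION & SPEC =====
def Spec_seperate_pattern (pattern : String) (out : List String) : Prop := out = seperate_pattern_alt pattern
instance (pattern : String) (out : List String) : Decidable (Spec_seperate_pattern pattern out) := by unfold Spec_seperate_pattern; infer_instance

-- ===== CLAIM (what is proved, stated in full; the proofs are below) =====
def Claim_equal_seperate_pattern : Prop := ∀ (pattern : String), Dom_seperate_pattern pattern → Spec_seperate_pattern pattern (seperate_pattern pattern)

-- ===== LEMMAS AND PROOFS =====

-- reference form of pattern.split('[') (single-char separator)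
def pvSplitA : List Char → List (List Char)
  | [] => [[]]
  | c :: r =>
    if c = '[' then [] :: pvSplitA r
    else
      match pvSplitA r with
      | p :: ps => (c :: p) :: ps
      | [] => [[c]]

-- what A's loop body emits for one part
def pvProc (p : List Char) : List String :=
  if ']' ∈ p then
    String.ofList ('[' :: p.takeWhile (· ≠ ']') ++ [']']) :: ((p.dropWhile (· ≠ ']')).tail).map pvSing
  else p.map pvSing

theorem pvSplitA_ne_nil (cs : List Char) : pvSplitA cs ≠ [] := by
  cases cs with
  | nil => simp [pvSplitA]
  | cons c r =>
    simp only [pvSplitA]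
    split
    · simp
    · split <;> simp

theorem pvSplitOn_go_eq (fuel : Nat) :
    ∀ (l cur : List Char) (acc : List (List Char)), l.length < fuel →
      PySem.Chars.splitOn.go ['['] fuel l cur acc
        = acc.reverse ++ (pvSplitA l).modifyHead (cur.reverse ++ ·) := by
  induction fuel with
  | zero => intro l cur acc h; omega
  | succ fuel ih =>
    intro l cur acc h
    cases l with
    | nil =>
      rw [PySem.Chars.splitOn.go] <;> simp [pvSplitA]
    | cons c r =>
      by_cases hc : c = '['
      · subst hc
        rw [PySem.Chars.splitOn.go]
        simp only [List.isPrefixOf, beq_self_eq_true, Bool.true_and, if_true,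
          List.length_cons, List.length_nil, Nat.zero_add, List.drop_succ_cons, List.drop_zero]
        rw [ih r [] _ (by simpa using Nat.lt_of_succ_lt_succ h)]
        cases hps : pvSplitA r <;> simp [pvSplitA, hps]
      · rw [PySem.Chars.splitOn.go]
        simp only [List.isPrefixOf, Bool.and_true]
        rw [if_neg (by simp [Ne.symm hc])]
        rw [ih r (c :: cur) acc (by simpa using Nat.lt_of_succ_lt_succ h)]
        simp only [pvSplitA, if_neg hc]
        rcases hps : pvSplitA r with _ | ⟨p, ps⟩
        · exact absurd hps (pvSplitA_ne_nil r)
        · simp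

theorem pvSplitOn_eq (cs : List Char) : PySem.Chars.splitOn cs ['['] = pvSplitA cs := by
  rw [PySem.Chars.splitOn, pvSplitOn_go_eq (cs.length + 1) cs [] [] (by omega)]
  rcases h : pvSplitA cs with _ | ⟨p, ps⟩
  · exact absurd h (pvSplitA_ne_nil cs)
  · simp

theorem pvSplitOnMax_go_zero (fuel : Nat) (l cur : List Char) (acc : List (List Char)) :
    PySem.Chars.splitOnMax.go [']'] fuel 0 l cur acc = ((cur.reverse ++ l) :: acc).reverse := by
  cases fuel with
  | zero => rw [PySem.Chars.splitOnMax.go.eq_def]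
  | succ fuel => rw [PySem.Chars.splitOnMax.go.eq_def]; cases l <;> simp

theorem pvSplitOnMax_go_one (fuel : Nat) :
    ∀ (l cur : List Char) (acc : List (List Char)), l.length < fuel →
      PySem.Chars.splitOnMax.go [']'] fuel 1 l cur acc
        = acc.reverse ++
          (if ']' ∈ l then [cur.reverse ++ l.takeWhile (· ≠ ']'), (l.dropWhile (· ≠ ']')).tail]
           else [cur.reverse ++ l]) := by
  induction fuel with
  | zero => intro l cur acc h; omega
  | succ fuel ih =>
    intro l cur acc h
    cases l with
    | nil => rw [PySem.Chars.splitOnMax.go] <;> simp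
    | cons c r =>
      by_cases hc : c = ']'
      · subst hc
        rw [PySem.Chars.splitOnMax.go]
        simp only [List.isPrefixOf, beq_self_eq_true, Bool.true_and, if_true,
          if_neg (by omega : ¬ (1:Nat) = 0), List.length_cons, List.length_nil,
          Nat.zero_add, List.drop_succ_cons, List.drop_zero]
        rw [show (1:Nat) - 1 = 0 from rfl, pvSplitOnMax_go_zero]
        simp
      · rw [PySem.Chars.splitOnMax.go]
        simp only [List.isPrefixOf, Bool.and_true, if_neg (by omega : ¬ (1:Nat) = 0)]
        rw [if_neg (by simp [Ne.symm hc])]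
        rw [ih r (c :: cur) acc (by simpa using Nat.lt_of_succ_lt_succ h)]
        simp [hc, Ne.symm hc]

theorem pvSplitOnMax_mem (p : List Char) (h : ']' ∈ p) :
    PySem.Chars.splitOnMax p [']'] 1
      = [p.takeWhile (· ≠ ']'), (p.dropWhile (· ≠ ']')).tail] := by
  rw [PySem.Chars.splitOnMax]
  rw [if_neg (by omega)]
  rw [show ((1:Int).toNat) = 1 from rfl, pvSplitOnMax_go_one (p.length + 1) p [] [] (by omega)]
  simp [h]

theorem pvIsIn_eq (p : List Char) : PySem.Chars.isIn [']'] p = decide (']' ∈ p) := by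
  by_cases h : ']' ∈ p
  · simp [h, PySem.Chars.isIn_iff_infix, List.singleton_infix_iff]
  · simp [h, PySem.Chars.isIn_eq_false_iff, List.singleton_infix_iff]

-- A's foldl emits pvProc per part
theorem pvFoldA (l : List (List Char)) :
    ∀ acc : List String,
      l.foldl
        (fun sep part =>
          if PySem.Chars.isIn [']'] part then
            match PySem.Chars.splitOnMax part [']'] 1 with
            | reg :: rest :: _ => sep ++ [String.ofList ('[' :: reg ++ [']'])] ++ rest.map pvSing
            | _ => sep
          else sep ++ part.map pvSing) acc
      = acc ++ l.flatMap pvProc := by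
  induction l with
  | nil => intro acc; simp
  | cons p l ih =>
    intro acc
    simp only [List.foldl_cons, List.flatMap_cons]
    rw [ih]
    by_cases h : ']' ∈ p
    · rw [pvIsIn_eq, if_pos (by simpa using h), pvSplitOnMax_mem p h]
      simp [pvProc, h]
    · rw [pvIsIn_eq, if_neg (by simpa using h)]
      simp [pvProc, h]

theorem pvA_eq (cs : List Char) :
    seperate_pattern (String.ofList cs) = (pvSplitA cs).flatMap pvProc := by
  unfold seperate_pattern
  rw [String.toList_ofList, pvSplitOn_eq, pvFoldA]
  simp

-- B's finishing step (the code after B's loop)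
def pvFinish (st : List String × List Char × Bool) : List String :=
  match st with
  | (res, buf, collecting) => if collecting then res ++ buf.map pvSing else res

-- one-step reductions of B's scan
theorem pvStep_lbrack (res : List String) (buf : List Char) (col : Bool) :
    pvScanStep (res, buf, col) '[' = (res ++ buf.map pvSing, [], true) := by
  simp [pvScanStep]

theorem pvStep_rbrack_t (res : List String) (buf : List Char) :
    pvScanStep (res, buf, true) ']' = (res ++ [String.ofList ('[' :: buf ++ [']'])], [], false) := by
  simp [pvScanStep]

theorem pvStep_other_t (res : List String) (buf : List Char) (c : Char)
    (h1 : c ≠ '[') (h2 : c ≠ ']') :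
    pvScanStep (res, buf, true) c = (res, buf ++ [c], true) := by
  simp [pvScanStep, h1, h2]

theorem pvStep_f (res : List String) (buf : List Char) (c : Char) (h1 : c ≠ '[') :
    pvScanStep (res, buf, false) c = (res ++ [pvSing c], buf, false) := by
  simp [pvScanStep, h1]

theorem pvTakeWhile_buf (buf p : List Char) (h : ']' ∉ buf) :
    List.takeWhile (fun x => !decide (x = ']')) (buf ++ ']' :: p) = buf := by
  induction buf with
  | nil => simp
  | cons a t ih =>
    simp only [List.mem_cons, not_or] at h
    simp [Ne.symm h.1, ih h.2]

theorem pvDropWhile_buf (buf p : List Char) (h : ']' ∉ buf) :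
    List.dropWhile (fun x => !decide (x = ']')) (buf ++ ']' :: p) = ']' :: p := by
  induction buf with
  | nil => simp
  | cons a t ih =>
    simp only [List.mem_cons, not_or] at h
    simp [Ne.symm h.1, ih h.2]

-- main scan invariant: collecting (a) and passthrough (b) modes against A's decomposition
theorem pvScan_main (cs : List Char) :
    ∀ (acc : List String) (buf : List Char), ']' ∉ buf → '[' ∉ buf →
      (pvFinish (cs.foldl pvScanStep (acc, buf, true))
        = acc ++ ((pvSplitA cs).modifyHead (buf ++ ·)).flatMap pvProc)
      ∧ (pvFinish (cs.foldl pvScanStep (acc, [], false))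
        = acc ++ (match pvSplitA cs with
                  | p :: ps => p.map pvSing ++ ps.flatMap pvProc
                  | [] => [])) := by
  induction cs with
  | nil =>
    intro acc buf hr hl
    constructor
    · simp [pvFinish, pvSplitA, pvProc, hr]
    · simp [pvFinish, pvSplitA]
  | cons c r ih =>
    intro acc buf hr hl
    constructor
    · -- collecting mode
      by_cases hc1 : c = '['
      · subst hc1
        rw [List.foldl_cons, pvStep_lbrack]
        rw [(ih (acc ++ buf.map pvSing) [] (by simp) (by simp)).1]
        rcases hps : pvSplitA r with _ | ⟨p, ps⟩
        · exact absurd hps (pvSplitA_ne_nil r)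
        · simp [pvSplitA, hps, pvProc, hr]
      · by_cases hc2 : c = ']'
        · subst hc2
          rw [List.foldl_cons, pvStep_rbrack_t]
          rw [(ih (acc ++ [String.ofList ('[' :: buf ++ [']'])]) buf hr hl).2]
          rcases hps : pvSplitA r with _ | ⟨p, ps⟩
          · exact absurd hps (pvSplitA_ne_nil r)
          · simp only [pvSplitA, if_neg hc1, hps, List.modifyHead_cons, List.flatMap_cons]
            have h1 := pvTakeWhile_buf buf p hr
            have h2 := pvDropWhile_buf buf p hr
            simp [pvProc, h1, h2]
        · rw [List.foldl_cons, pvStep_other_t acc buf c hc1 hc2]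
          rw [(ih acc (buf ++ [c]) (by simp [hr, Ne.symm hc2]) (by simp [hl, Ne.symm hc1])).1]
          rcases hps : pvSplitA r with _ | ⟨p, ps⟩
          · exact absurd hps (pvSplitA_ne_nil r)
          · simp [pvSplitA, if_neg hc1, hps]
    · -- passthrough mode
      by_cases hc1 : c = '['
      · subst hc1
        rw [List.foldl_cons, pvStep_lbrack]
        simp only [List.map_nil, List.append_nil]
        rw [(ih acc [] (by simp) (by simp)).1]
        rcases hps : pvSplitA r with _ | ⟨p, ps⟩
        · exact absurd hps (pvSplitA_ne_nil r)
        · simp [pvSplitA, hps]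
      · rw [List.foldl_cons, pvStep_f acc [] c hc1]
        rw [(ih (acc ++ [pvSing c]) [] (by simp) (by simp)).2]
        rcases hps : pvSplitA r with _ | ⟨p, ps⟩
        · exact absurd hps (pvSplitA_ne_nil r)
        · simp [pvSplitA, if_neg hc1, hps]

theorem pvB_eq (cs : List Char) :
    seperate_pattern_alt (String.ofList cs) = (pvSplitA cs).flatMap pvProc := by
  unfold seperate_pattern_alt
  rw [String.toList_ofList]
  change pvFinish (cs.foldl pvScanStep ([], [], true)) = _
  rw [(pvScan_main cs [] [] (by simp) (by simp)).1]
  rcases hps : pvSplitA cs with _ | ⟨p, ps⟩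
  · exact absurd hps (pvSplitA_ne_nil cs)
  · simp

-- ===== VERDICT (by name: the statement is the Claim_ definition above) =====
theorem seperate_pattern_spec : Claim_equal_seperate_pattern := by
  intro pattern _
  unfold Spec_seperate_pattern
  have h : pattern = String.ofList pattern.toList := by simp
  rw [h, pvA_eq, pvB_eq]
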